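-- pv_equiv track=rewrite | github.com/NT710/Macro-advisor | plugins/macro-advisor/scripts/generate_dashboard.py | _parse_table_section
-- ===== SOURCE A (Python) =====
-- def _normalize_header(h):
--     """Normalize a markdown table header to a simple key.
--     'Why (plain language)' -> 'why', 'Sector' -> 'sector', etc."""
--     return h.lower().split('(')[0].strip()
--
-- def _parse_table_section(lines):
--     """Parse a markdown table from a list of lines. Returns list of dicts."""
--     rows = []
--     header_cols = []
--     for line in lines:
--         if '|' not in line:
--             continue
--         cells = [c.strip() for c in line.split('|')[1:-1]]
--         if all(set(c) <= set('- :') for c in cells):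
--             continue  # separator row
--         if not header_cols:
--             header_cols = [_normalize_header(c) for c in cells]
--             continue
--         row = dict(zip(header_cols, cells))
--         if any(row.values()):
--             rows.append(row)
--     return rows
-- ===== SOURCE B (Python) =====
-- def _scan_cells(line):
--     """Char-level tokenizer: a cell is the text strictly between two '|' chars.
--     Returns None when the line contains no '|' at all."""
--     cells = None
--     cur = []
--     for ch in line:
--         if ch == '|':
--             if cells is None:
--                 cells = []
--             else:
--                 cells.append(''.join(cur).strip())
--             cur = []
--         else:
--             cur.append(ch)
--     return cells
--
--
-- def _is_separator(cells):
--     return all(c.strip('-: ') == '' for c in cells)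
--
--
-- def _parse_table_section(lines):
--     """Two staged loops over one shared iterator: the first consumes lines up
--     to and including the header row, the second turns the remaining lines
--     into row dicts."""
--     it = iter(lines)
--     header = None
--     for line in it:
--         cells = _scan_cells(line)
--         if cells is None or _is_separator(cells):
--             continue
--         header = [c.lower().partition('(')[0].strip() for c in cells]
--         break
--     if header is None:
--         return []
--     rows = []
--     for line in it:
--         cells = _scan_cells(line)
--         if cells is None or _is_separator(cells):
--             continue
--         row = dict(zip(header, cells))
--         if any(row.values()):
--             rows.append(row)
--     return rows
-- ===== Notes on version B (the rewrite author's own statement) =====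
-- stated objective: alternative
-- what changed: Replaces A's split('|')-and-slice cell extraction and single stateful loop (header_cols flag) with a hand-written character-level tokenizer for cells and two staged loops consuming one shared iterator (the first finds the header row and stops, the second builds the row dicts), plus strip-based separator and partition-based header tests.
import Mathlib
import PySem

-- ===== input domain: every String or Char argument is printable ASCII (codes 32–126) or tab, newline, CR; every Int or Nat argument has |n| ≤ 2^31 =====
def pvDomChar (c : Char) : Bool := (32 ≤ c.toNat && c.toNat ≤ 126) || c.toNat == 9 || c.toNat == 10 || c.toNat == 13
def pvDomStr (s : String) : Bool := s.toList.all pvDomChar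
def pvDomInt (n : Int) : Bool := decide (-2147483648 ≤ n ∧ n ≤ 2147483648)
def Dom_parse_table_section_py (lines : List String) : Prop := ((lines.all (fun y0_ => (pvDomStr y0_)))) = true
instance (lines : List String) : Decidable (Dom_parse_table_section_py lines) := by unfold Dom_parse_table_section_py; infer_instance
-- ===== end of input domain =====

-- B replaces A's split('|')-slice cell extraction and single stateful loop by a character-level
-- tokenizer and two staged loops over one shared line stream; return values are identical.

-- dict(zip(header, cells)) and any(row.values()) — the same expressions occur in both Pythons
def pvMkDict (header cells : List String) : PySem.Dict String String :=
  PySem.Dict.ofList (header.zip cells)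

def pvKeep (d : PySem.Dict String String) : Bool :=
  d.values.any (fun v => !(v == ""))

-- ===== PORT A =====
-- cells = [c.strip() for c in line.split('|')[1:-1]]
def pvCells (line : String) : List String :=
  (PySem.List.slice ((PySem.Str.split? line "|").getD []) (some 1) (some (-1))).map PySem.Str.strip

-- all(set(c) <= set('- :') for c in cells)
def pvIsSep (cells : List String) : Bool :=
  cells.all (fun c => c.toList.all (fun ch => ch == '-' || ch == ' ' || ch == ':'))

-- _normalize_header: h.lower().split('(')[0].strip()
def pvNormalize (h : String) : String :=
  PySem.Str.strip (((PySem.Str.split? (PySem.Str.lower h) "(").getD []).headD "")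

-- single fold over the lines with state (rows, header_cols); header_cols = [] means "not yet set"
def pvStepA (st : List (List (String × String)) × List String) (line : String) :
    List (List (String × String)) × List String :=
  if !(PySem.Str.isIn "|" line) then st
  else
    let cells := pvCells line
    if pvIsSep cells then st
    else if st.2 = [] then (st.1, cells.map pvNormalize)
    else
      let row := pvMkDict st.2 cells
      if pvKeep row then (st.1 ++ [row.items], st.2) else st

def parse_table_section_py (lines : List String) : List (List (String × String)) :=
  (lines.foldl pvStepA ([], [])).1

-- ===== PORT B =====
-- _scan_cells: char-level tokenizer; state = (cells so far — none before the first '|', cur chars)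
def bCellsStep (st : Option (List String) × List Char) (ch : Char) :
    Option (List String) × List Char :=
  if ch = '|' then
    match st.1 with
    | none => (some [], [])
    | some cs => (some (cs ++ [PySem.Str.strip (String.ofList st.2)]), [])
  else (st.1, st.2 ++ [ch])

def bCells (line : String) : Option (List String) :=
  (line.toList.foldl bCellsStep (none, [])).1

-- c.strip('-: ') == '' — ported with PySem.Chars.stripChars (exact)
def bIsSep (cells : List String) : Bool :=
  cells.all (fun c => PySem.Chars.stripChars c.toList ['-', ':', ' '] == [])

-- c.lower().partition('(')[0].strip(): partition('(')[0] is the part before the first '(',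
-- ported exactly as takeWhile (· ≠ '(')
def bNormalize (h : String) : String :=
  PySem.Str.strip (String.ofList (((PySem.Str.lower h).toList).takeWhile (fun ch => ch ≠ '(')))

-- first staged loop: consume lines up to and including the header row
def bSeek : List String → Option (List String × List String)
  | [] => none
  | l :: ls =>
    match bCells l with
    | none => bSeek ls
    | some cells =>
      if bIsSep cells then bSeek ls
      else some (cells.map bNormalize, ls)

-- second staged loop: turn each remaining line into a row dict
def bStep (header : List String) (rows : List (List (String × String))) (l : String) :
    List (List (String × String)) :=
  match bCells l with
  | none => rows
  | some cells =>
    if bIsSep cells then rows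
    else
      let row := pvMkDict header cells
      if pvKeep row then rows ++ [row.items] else rows

def parse_table_section_py_alt (lines : List String) : List (List (String × String)) :=
  match bSeek lines with
  | none => []
  | some (header, rest) => rest.foldl (bStep header) []

-- ===== PRECONDITION & SPEC =====
def Spec_parse_table_section_py (lines : List String) (out : List (List (String × String))) : Prop := out = parse_table_section_py_alt lines
instance (lines : List String) (out : List (List (String × String))) : Decidable (Spec_parse_table_section_py lines out) := by unfold Spec_parse_table_section_py; infer_instance

-- ===== CLAIM (what is proved, stated in full; the proofs are below) =====
def Claim_equal_parse_table_section_py : Prop := ∀ (lines : List String), Dom_parse_table_section_py lines → Spec_parse_table_section_py lines (parse_table_section_py lines)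

-- ===== LEMMAS AND PROOFS =====

-- model of splitting a char list on a single separator char
def pvSplitC (sep : Char) : List Char → List (List Char)
  | [] => [[]]
  | c :: rest =>
    if c = sep then [] :: pvSplitC sep rest
    else
      match pvSplitC sep rest with
      | [] => [[c]]
      | h :: t => (c :: h) :: t

lemma pvSplitC_ne_nil (sep : Char) (cs : List Char) : pvSplitC sep cs ≠ [] := by
  cases cs with
  | nil => simp [pvSplitC]
  | cons c rest =>
    by_cases h : c = sep <;> simp only [pvSplitC, h, if_true, if_false]
    · simp
    · cases hr : pvSplitC sep rest <;> simp

lemma pvSplitC_go (sep : Char) :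
    ∀ (fuel : Nat) (l cur : List Char) (acc : List (List Char)), l.length ≤ fuel →
      PySem.Chars.splitOn.go [sep] fuel l cur acc =
        acc.reverse ++
          (match pvSplitC sep l with
           | [] => []
           | h :: t => (cur.reverse ++ h) :: t) := by
  intro fuel
  induction fuel with
  | zero =>
    intro l cur acc hl
    have : l = [] := by cases l <;> simp_all
    subst this
    simp [PySem.Chars.splitOn.go, pvSplitC]
  | succ f ih =>
    intro l cur acc hl
    cases l with
    | nil => simp [PySem.Chars.splitOn.go, pvSplitC]
    | cons c rest =>
      by_cases hc : c = sep
      · subst hc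
        rw [PySem.Chars.splitOn.go]
        have hp : [c].isPrefixOf (c :: rest) = true := by simp [List.isPrefixOf]
        rw [if_pos hp]
        simp only [List.length_cons, List.length_nil, List.drop_succ_cons, List.drop_zero, Nat.zero_add]
        rw [ih rest [] ((cur.reverse) :: acc) (by simpa using Nat.le_of_succ_le_succ hl)]
        simp only [pvSplitC, if_true]
        cases hr : pvSplitC c rest with
        | nil => exact absurd hr (pvSplitC_ne_nil c rest)
        | cons h t => simp
      · rw [PySem.Chars.splitOn.go]
        have hp : [sep].isPrefixOf (c :: rest) = false := by
          simp [List.isPrefixOf]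
          intro h; exact absurd h.symm hc
        rw [if_neg (by simp [hp])]
        rw [ih rest (c :: cur) acc (by simpa using Nat.le_of_succ_le_succ hl)]
        simp only [pvSplitC, if_neg hc]
        cases hr : pvSplitC sep rest with
        | nil => exact absurd hr (pvSplitC_ne_nil sep rest)
        | cons h t => simp

lemma pvSplitOn_eq (sep : Char) (cs : List Char) :
    PySem.Chars.splitOn cs [sep] = pvSplitC sep cs := by
  unfold PySem.Chars.splitOn
  rw [pvSplitC_go sep (cs.length + 1) cs [] [] (by omega)]
  cases hr : pvSplitC sep cs with
  | nil => exact absurd hr (pvSplitC_ne_nil sep cs)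
  | cons h t => simp

-- the cells and trailing segment produced once the first '|' has been seen
def pvCellsOf (cs : List Char) : List String :=
  ((pvSplitC '|' cs).dropLast).map (fun seg => PySem.Str.strip (String.ofList seg))

def pvLastSeg (cs : List Char) : List Char :=
  (pvSplitC '|' cs).getLastD []

lemma pvSplitC_append_no_sep (sep : Char) (pre l : List Char) (hpre : sep ∉ pre) :
    pvSplitC sep (pre ++ l) =
      match pvSplitC sep l with
      | [] => []
      | h :: t => (pre ++ h) :: t := by
  induction pre with
  | nil =>
    simp only [List.nil_append]
    cases hr : pvSplitC sep l with
    | nil => exact absurd hr (pvSplitC_ne_nil sep l)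
    | cons h t => simp
  | cons p pre ih =>
    have hp : p ≠ sep := by intro h; exact hpre (by simp [h])
    have hpre' : sep ∉ pre := fun h => hpre (by simp [h])
    simp only [List.cons_append, pvSplitC, if_neg hp, ih hpre']
    cases hr : pvSplitC sep l with
    | nil => exact absurd hr (pvSplitC_ne_nil sep l)
    | cons h t => simp

lemma pvScanSome (cs : List Char) : ∀ (acc : List String) (cur : List Char), '|' ∉ cur →
    cs.foldl bCellsStep (some acc, cur) =
      (some (acc ++ pvCellsOf (cur ++ cs)), pvLastSeg (cur ++ cs)) := by
  induction cs with
  | nil =>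
    intro acc cur hcur
    have h1 : pvSplitC '|' cur = [cur] := by
      have := pvSplitC_append_no_sep '|' cur [] hcur
      simpa [pvSplitC] using this
    simp [pvCellsOf, pvLastSeg, h1]
  | cons c cs ih =>
    intro acc cur hcur
    by_cases hc : c = '|'
    · subst hc
      have h1 : pvSplitC '|' (cur ++ '|' :: cs) = cur :: pvSplitC '|' cs := by
        rw [pvSplitC_append_no_sep '|' cur ('|' :: cs) hcur]
        simp only [pvSplitC, if_true]
        cases hr : pvSplitC '|' cs with
        | nil => exact absurd hr (pvSplitC_ne_nil '|' cs)
        | cons h t => simp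
      obtain ⟨h, t, hS⟩ : ∃ h t, pvSplitC '|' cs = h :: t := by
        cases hr : pvSplitC '|' cs with
        | nil => exact absurd hr (pvSplitC_ne_nil '|' cs)
        | cons h t => exact ⟨h, t, rfl⟩
      simp only [List.foldl_cons, bCellsStep, if_true]
      rw [ih (acc ++ [PySem.Str.strip (String.ofList cur)]) [] (by simp)]
      simp [pvCellsOf, pvLastSeg, h1, hS]
    · have hcur' : '|' ∉ cur ++ [c] := by
        simp [hcur]; intro h; exact hc h.symm
      simp only [List.foldl_cons, bCellsStep, if_neg hc]
      rw [ih acc (cur ++ [c]) hcur']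
      simp

lemma pvScanNone (cs : List Char) : ∀ (cur : List Char),
    cs.foldl bCellsStep (none, cur) =
      (match cs.dropWhile (fun ch => !(ch == '|')) with
       | [] => ((none : Option (List String)), cur ++ cs)
       | _ :: rest => (some (pvCellsOf rest), pvLastSeg rest)) := by
  induction cs with
  | nil => intro cur; simp
  | cons c cs ih =>
    intro cur
    by_cases hc : c = '|'
    · subst hc
      simp only [List.foldl_cons, bCellsStep, if_true]
      rw [pvScanSome cs [] [] (by simp)]
      simp
    · simp only [List.foldl_cons, bCellsStep, if_neg hc]
      rw [ih (cur ++ [c])]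
      rw [List.dropWhile_cons]
      have hpc : (!(c == '|')) = true := by simp [hc]
      rw [if_pos hpc]
      cases hd : cs.dropWhile (fun ch => !(ch == '|')) with
      | nil => simp
      | cons x rest => simp

lemma pvSlice_one_neg_one {α : Type} (x : α) (ys : List α) :
    PySem.List.slice (x :: ys) (some 1) (some (-1)) = ys.dropLast := by
  simp only [PySem.List.slice, PySem.List.clampIdx, List.dropLast_eq_take]
  norm_num
  split_ifs with h
  · omega
  · omega

lemma pvIsIn_pipe (line : String) :
    PySem.Str.isIn "|" line = true ↔ '|' ∈ line.toList := by
  rw [PySem.Str.isIn_iff_infix]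
  exact List.singleton_infix_iff '|' line.toList

-- bridge: B's tokenizer computes exactly A's split-slice-strip cells
lemma pvCells_bridge (line : String) :
    bCells line = if PySem.Str.isIn "|" line then some (pvCells line) else none := by
  unfold bCells
  rw [pvScanNone line.toList []]
  by_cases hp : PySem.Str.isIn "|" line = true
  · have hmem : '|' ∈ line.toList := (pvIsIn_pipe line).mp hp
    have hd : line.toList.dropWhile (fun ch => !(ch == '|')) ≠ [] := by
      intro hnil
      rw [List.dropWhile_eq_nil_iff] at hnil
      have := hnil '|' hmem
      simp at this
    cases hdw : line.toList.dropWhile (fun ch => !(ch == '|')) with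
    | nil => exact absurd hdw hd
    | cons c rest =>
      have hc : c = '|' := by
        have h2 : line.toList.dropWhile (fun ch => !(ch == '|')) ≠ [] := by simp [hdw]
        have := List.head_dropWhile_not (p := fun ch => !(ch == '|')) (l := line.toList) h2
        have hh : (line.toList.dropWhile (fun ch => !(ch == '|'))).head h2 = c := by simp [hdw]
        rw [hh] at this
        simpa using this
      subst hc
      have hts : line.toList = line.toList.takeWhile (fun ch => !(ch == '|')) ++ '|' :: rest := by
        conv_lhs => rw [← List.takeWhile_append_dropWhile (p := fun ch => !(ch == '|')) (l := line.toList)]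
        rw [hdw]
      have hpre : '|' ∉ line.toList.takeWhile (fun ch => !(ch == '|')) := by
        intro hm
        have := List.mem_takeWhile_imp hm
        simp at this
      have hsplit : pvSplitC '|' line.toList =
          line.toList.takeWhile (fun ch => !(ch == '|')) :: pvSplitC '|' rest := by
        conv_lhs => rw [hts]
        rw [pvSplitC_append_no_sep '|' _ _ hpre]
        simp only [pvSplitC, if_true]
        cases hr : pvSplitC '|' rest with
        | nil => exact absurd hr (pvSplitC_ne_nil '|' rest)
        | cons h t => simp
      have hcells : pvCells line = pvCellsOf rest := by
        unfold pvCells pvCellsOf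
        rw [show PySem.Str.split? line "|" =
            some ((pvSplitC '|' line.toList).map String.ofList) by
          simp [PySem.Str.split?, PySem.Chars.split?, pvSplitOn_eq]]
        simp only [Option.getD_some, hsplit, List.map_cons, pvSlice_one_neg_one,
          ← List.map_dropLast, List.map_map]
        apply List.map_congr_left
        intro seg _
        simp [Function.comp, PySem.Str.strip]
      rw [if_pos hp]
      simp [hcells]
  · have hnm : '|' ∉ line.toList := fun hm => hp ((pvIsIn_pipe line).mpr hm)
    have hdw : line.toList.dropWhile (fun ch => !(ch == '|')) = [] := by
      rw [List.dropWhile_eq_nil_iff]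
      intro x hx
      have : x ≠ '|' := fun h => hnm (h ▸ hx)
      simp [this]
    rw [if_neg hp]
    simp [hdw]

-- bridge: the two separator tests agree
lemma pvStripChars_empty (c : String) :
    (PySem.Chars.stripChars c.toList ['-', ':', ' '] == []) =
      c.toList.all (fun ch => ch == '-' || ch == ' ' || ch == ':') := by
  have hiff : PySem.Chars.stripChars c.toList ['-', ':', ' '] = [] ↔
      ∀ x ∈ c.toList, (['-', ':', ' '].contains x) = true := by
    constructor
    · intro h
      unfold PySem.Chars.stripChars at h
      rw [List.reverse_eq_nil_iff, List.dropWhile_eq_nil_iff] at h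
      intro x hx
      by_cases hdrop : x ∈ List.dropWhile (fun ch => ['-', ':', ' '].contains ch) c.toList
      · exact h x (by simpa using hdrop)
      · have hsplit := List.takeWhile_append_dropWhile
          (p := fun ch => ['-', ':', ' '].contains ch) (l := c.toList)
        rw [← hsplit] at hx
        rcases List.mem_append.mp hx with htake | hd
        · exact List.mem_takeWhile_imp htake
        · exact absurd hd hdrop
    · intro h
      unfold PySem.Chars.stripChars
      have h1 : List.dropWhile (fun ch => ['-', ':', ' '].contains ch) c.toList = [] :=
        List.dropWhile_eq_nil_iff.mpr h
      change (List.dropWhile (fun ch => ['-', ':', ' '].contains ch)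
        ((List.dropWhile (fun ch => ['-', ':', ' '].contains ch) c.toList).reverse)).reverse = []
      rw [h1]
      simp
  have hpt : ∀ x : Char, (['-', ':', ' '].contains x) = (x == '-' || x == ' ' || x == ':') := by
    intro x
    by_cases h1 : x = '-' <;> by_cases h2 : x = ' ' <;> by_cases h3 : x = ':' <;>
      simp [h1, h2, h3]
  cases hall : c.toList.all (fun ch => ch == '-' || ch == ' ' || ch == ':') with
  | true =>
    have : PySem.Chars.stripChars c.toList ['-', ':', ' '] = [] := by
      rw [hiff]
      intro x hx
      rw [hpt x]
      exact List.all_eq_true.mp hall x hx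
    simp [this]
  | false =>
    have : PySem.Chars.stripChars c.toList ['-', ':', ' '] ≠ [] := by
      intro h
      rw [hiff] at h
      have : c.toList.all (fun ch => ch == '-' || ch == ' ' || ch == ':') = true := by
        rw [List.all_eq_true]
        intro x hx
        rw [← hpt x]
        exact h x hx
      rw [hall] at this
      exact Bool.false_ne_true this
    simpa using this

-- bridge: the two separator tests agree
lemma pvSep_bridge (cells : List String) : bIsSep cells = pvIsSep cells := by
  unfold bIsSep pvIsSep
  congr 1
  funext c
  rw [pvStripChars_empty]

-- bridge: the two header normalizations agree
lemma pvSplitC_headD (sep : Char) (cs : List Char) :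
    (pvSplitC sep cs).headD [] = cs.takeWhile (fun ch => ch ≠ sep) := by
  induction cs with
  | nil => simp [pvSplitC]
  | cons c rest ih =>
    by_cases hc : c = sep
    · subst hc
      simp [pvSplitC]
    · simp only [pvSplitC, if_neg hc]
      cases hr : pvSplitC sep rest with
      | nil => exact absurd hr (pvSplitC_ne_nil sep rest)
      | cons h t =>
        rw [hr] at ih
        simp only [List.headD_cons] at ih ⊢
        rw [List.takeWhile_cons_of_pos (by simp [hc])]
        rw [ih]

-- bridge: the two header normalizations agree
lemma pvNorm_bridge (h : String) : bNormalize h = pvNormalize h := by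
  unfold bNormalize pvNormalize
  rw [show PySem.Str.split? (PySem.Str.lower h) "(" =
      some ((pvSplitC '(' (PySem.Str.lower h).toList).map String.ofList) by
    simp [PySem.Str.split?, PySem.Chars.split?, pvSplitOn_eq]]
  simp only [Option.getD_some]
  cases hr : pvSplitC '(' (PySem.Str.lower h).toList with
  | nil => exact absurd hr (pvSplitC_ne_nil _ _)
  | cons h0 t =>
    have heq := pvSplitC_headD '(' (PySem.Str.lower h).toList
    rw [hr] at heq
    simp only [List.headD_cons] at heq
    simp only [PySem.Str.toList_lower] at heq ⊢
    rw [heq]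
    simp

lemma pvCells_ne_nil_of_not_sep {cs : List String} (h : ¬ pvIsSep cs = true) : cs ≠ [] := by
  intro hn; exact h (by simp [hn, pvIsSep])

lemma bStep_append (header : List String) (rows : List (List (String × String))) (l : String) :
    bStep header rows l = rows ++ bStep header [] l := by
  unfold bStep
  cases bCells l with
  | none => simp
  | some cells =>
    by_cases hs : bIsSep cells <;>
      by_cases hk : pvKeep (pvMkDict header cells) <;> simp [hs, hk]

lemma pvFoldB (header : List String) (ls : List String) (r : List (List (String × String))) :
    ls.foldl (bStep header) r = r ++ ls.flatMap (bStep header []) := by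
  have hfun : bStep header = fun rows l => rows ++ bStep header [] l :=
    funext fun rows => funext fun l => bStep_append header rows l
  rw [hfun, PySem.List.foldl_append_eq_flatMap]
  simp

lemma pvStep_body (header : List String) (hh : header ≠ [])
    (acc : List (List (String × String))) (l : String) :
    pvStepA (acc, header) l = (acc ++ bStep header [] l, header) := by
  by_cases hp : PySem.Str.isIn "|" l = true
  · have hb : bCells l = some (pvCells l) := by rw [pvCells_bridge, if_pos hp]
    have hpc : PySem.Chars.isIn ['|'] l.toList = true := by
      simpa [PySem.Str.isIn] using hp
    unfold pvStepA bStep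
    rw [hb]
    by_cases hs : pvIsSep (pvCells l) = true
    · simp [hpc, hs, pvSep_bridge]
    · by_cases hk : pvKeep (pvMkDict header (pvCells l)) = true <;>
        simp [hpc, hs, hk, hh, pvSep_bridge]
  · have hb : bCells l = none := by rw [pvCells_bridge, if_neg hp]
    have hpc : PySem.Chars.isIn ['|'] l.toList = false := by
      have : PySem.Str.isIn "|" l = false := by simpa using hp
      simpa [PySem.Str.isIn] using this
    unfold pvStepA bStep
    rw [hb]
    simp [hpc]

-- body phase: once the header is set (non-empty), A's fold appends exactly B's rows
lemma pvBody (ls : List String) : ∀ (acc : List (List (String × String))) (header : List String),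
    header ≠ [] →
    ls.foldl pvStepA (acc, header) = (acc ++ ls.foldl (bStep header) [], header) := by
  induction ls with
  | nil => intro acc header hh; simp
  | cons l ls ih =>
    intro acc header hh
    rw [List.foldl_cons, List.foldl_cons, pvStep_body header hh acc l, ih _ header hh,
      pvFoldB, pvFoldB]
    simp

-- head phase: before the header is set, A's fold computes B's seek-then-fold
lemma pvHead (ls : List String) : ∀ (acc : List (List (String × String))),
    (ls.foldl pvStepA (acc, [])).1 =
      acc ++ (match bSeek ls with
              | none => []
              | some (header, rest) => rest.foldl (bStep header) []) := by
  induction ls with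
  | nil => intro acc; simp [bSeek]
  | cons l ls ih =>
    intro acc
    rw [List.foldl_cons]
    by_cases hp : PySem.Str.isIn "|" l = true
    · have hb : bCells l = some (pvCells l) := by rw [pvCells_bridge, if_pos hp]
      by_cases hs : pvIsSep (pvCells l) = true
      · have hpc : PySem.Chars.isIn ['|'] l.toList = true := by
          simpa [PySem.Str.isIn] using hp
        have : pvStepA (acc, []) l = (acc, []) := by
          unfold pvStepA
          simp [hpc, hs]
        rw [this, ih acc]
        have hseek : bSeek (l :: ls) = bSeek ls := by
          simp only [bSeek, hb]
          rw [pvSep_bridge, if_pos hs]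
        rw [hseek]
      · have hcne : pvCells l ≠ [] := pvCells_ne_nil_of_not_sep hs
        have hhne : (pvCells l).map pvNormalize ≠ [] := by simpa using hcne
        have hpc : PySem.Chars.isIn ['|'] l.toList = true := by
          simpa [PySem.Str.isIn] using hp
        have hstep : pvStepA (acc, []) l = (acc, (pvCells l).map pvNormalize) := by
          unfold pvStepA
          simp [hpc, hs]
        rw [hstep]
        have hmap : (pvCells l).map bNormalize = (pvCells l).map pvNormalize :=
          List.map_congr_left (fun c _ => pvNorm_bridge c)
        have hseek : bSeek (l :: ls) = some ((pvCells l).map pvNormalize, ls) := by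
          simp only [bSeek, hb]
          rw [pvSep_bridge, if_neg hs, hmap]
        rw [hseek]
        rw [pvBody ls acc ((pvCells l).map pvNormalize) hhne]
    · have hpc : PySem.Chars.isIn ['|'] l.toList = false := by
        have : PySem.Str.isIn "|" l = false := by simpa using hp
        simpa [PySem.Str.isIn] using this
      have hstep : pvStepA (acc, []) l = (acc, []) := by
        unfold pvStepA
        simp [hpc]
      have hb : bCells l = none := by rw [pvCells_bridge, if_neg hp]
      have hseek : bSeek (l :: ls) = bSeek ls := by
        simp only [bSeek, hb]
      rw [hstep, hseek, ih acc]

-- ===== VERDICT (by name: the statement is the Claim_ definition above) =====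
theorem parse_table_section_py_spec : Claim_equal_parse_table_section_py := by
  intro lines _
  unfold Spec_parse_table_section_py parse_table_section_py parse_table_section_py_alt
  rw [pvHead lines []]
  rfl
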